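-- pv_equiv track=rewrite | github.com/Eycest/istetim_sistem_odev_mehmet_turak_teker | isletim_odevi/src/yardimci.py | kac_tane_bitti
-- ===== SOURCE A (Python) =====
-- def kac_tane_bitti(zamanlar, noktalar):
--     cikti = {}
--     for n in noktalar:
--         bitti = []
--         for _, p, bit in zamanlar:
--             if p != "IDLE" and bit <= n and p not in bitti:
--                 bitti.append(p)
--         cikti[n] = len(bitti)
--     return cikti
-- ===== SOURCE B (Python) =====
-- def kac_tane_bitti(zamanlar, noktalar):
--     # One pass over zamanlar: earliest (minimum) finish time per non-IDLE process,
--     # then each threshold is answered by counting those minima.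
--     en_erken = {}
--     for _, p, bit in zamanlar:
--         if p != "IDLE":
--             eski = en_erken.get(p)
--             if eski is None or bit < eski:
--                 en_erken[p] = bit
--     minler = list(en_erken.values())
--     return {n: sum(1 for m in minler if m <= n) for n in noktalar}
-- ===== Notes on version B (the rewrite author's own statement) =====
-- stated objective: faster
-- what changed: Instead of rebuilding a deduplicated finished-process list for every threshold (scanning all of zamanlar and the dedup list each time), B makes one pass over zamanlar computing the minimum finish time per non-IDLE process and answers each threshold by counting those minima.
import Mathlib
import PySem

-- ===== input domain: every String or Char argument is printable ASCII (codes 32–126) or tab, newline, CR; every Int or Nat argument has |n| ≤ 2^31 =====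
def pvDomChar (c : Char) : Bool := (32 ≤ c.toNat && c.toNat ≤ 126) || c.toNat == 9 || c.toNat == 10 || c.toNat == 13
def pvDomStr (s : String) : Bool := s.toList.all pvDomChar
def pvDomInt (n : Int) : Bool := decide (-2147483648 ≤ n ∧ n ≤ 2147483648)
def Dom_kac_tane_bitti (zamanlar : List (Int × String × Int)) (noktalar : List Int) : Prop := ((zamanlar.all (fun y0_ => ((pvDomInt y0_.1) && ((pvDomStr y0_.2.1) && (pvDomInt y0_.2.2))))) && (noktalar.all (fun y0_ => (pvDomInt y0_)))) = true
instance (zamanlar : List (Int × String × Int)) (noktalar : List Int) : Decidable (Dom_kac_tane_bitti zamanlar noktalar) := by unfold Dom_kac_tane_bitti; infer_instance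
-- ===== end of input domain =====

-- B replaces A's per-threshold rebuild of a deduplicated finished-process list (a scan of all of
-- zamanlar, with an inner dedup-list scan, for every threshold) by one pass computing the minimum
-- finish time per non-IDLE process, then counting those minima per threshold (objective: faster).

-- ===== PORT A =====
-- literal transliteration of A: for each n, rebuild the dedup list `bitti`, then cikti[n] = len(bitti)
def kac_tane_bitti (zamanlar : List (Int × String × Int)) (noktalar : List Int) : List (Int × Int) :=
  (noktalar.foldl (fun (cikti : PySem.Dict Int Int) n =>
      let bitti := zamanlar.foldl (fun (bitti : List String) t =>
        if t.2.1 ≠ "IDLE" ∧ t.2.2 ≤ n ∧ t.2.1 ∉ bitti then bitti ++ [t.2.1] else bitti) []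
      cikti.insert n (bitti.length : Int)) PySem.Dict.empty).items

-- ===== PORT B =====
-- literal transliteration of B: min finish time per non-IDLE process, then count minima ≤ n
def kac_tane_bitti_alt (zamanlar : List (Int × String × Int)) (noktalar : List Int) : List (Int × Int) :=
  let en_erken : PySem.Dict String Int := zamanlar.foldl (fun d t =>
      if t.2.1 ≠ "IDLE" then
        match d.get? t.2.1 with
        | none => d.insert t.2.1 t.2.2
        | some eski => if t.2.2 < eski then d.insert t.2.1 t.2.2 else d
      else d) PySem.Dict.empty
  let minler := en_erken.values
  (noktalar.foldl (fun (cikti : PySem.Dict Int Int) n =>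
      cikti.insert n ((minler.filter (fun m => decide (m ≤ n))).length : Int)) PySem.Dict.empty).items

-- ===== PRECONDITION & SPEC =====
def Spec_kac_tane_bitti (zamanlar : List (Int × String × Int)) (noktalar : List Int) (out : List (Int × Int)) : Prop := out = kac_tane_bitti_alt zamanlar noktalar
instance (zamanlar : List (Int × String × Int)) (noktalar : List Int) (out : List (Int × Int)) : Decidable (Spec_kac_tane_bitti zamanlar noktalar out) := by unfold Spec_kac_tane_bitti; infer_instance

-- ===== CLAIM (what is proved, stated in full; the proofs are below) =====
def Claim_equal_kac_tane_bitti : Prop := ∀ (zamanlar : List (Int × String × Int)) (noktalar : List Int), Dom_kac_tane_bitti zamanlar noktalar → Spec_kac_tane_bitti zamanlar noktalar (kac_tane_bitti zamanlar noktalar)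

-- ===== LEMMAS AND PROOFS =====

lemma ktb_countP_flip {α : Type} (l : List α) (hnd : l.Nodup) (k : α) (hk : k ∈ l)
    (q q' : α → Bool) (hoff : ∀ x ∈ l, x ≠ k → q' x = q x) :
    l.countP q' + (if q k then 1 else 0) = l.countP q + (if q' k then 1 else 0) := by
  obtain ⟨s, u, rfl⟩ := List.mem_iff_append.mp hk
  rw [List.nodup_append] at hnd
  obtain ⟨hs, hu, hdisj⟩ := hnd
  have hks : k ∉ s := fun hks => hdisj k hks k (by simp) rfl
  have hku : k ∉ u := (List.nodup_cons.mp hu).1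
  have h1 : s.countP q' = s.countP q := List.countP_congr (fun x hx => by
    rw [hoff x (by simp [hx]) (fun he => hks (he ▸ hx))])
  have h2 : u.countP q' = u.countP q := List.countP_congr (fun x hx => by
    rw [hoff x (by simp [hx]) (fun he => hku (he ▸ hx))])
  simp only [List.countP_append, List.countP_cons, h1, h2]
  split_ifs <;> omega

def ktbStepA (n : Int) (b : List String) (t : Int × String × Int) : List String :=
  if t.2.1 ≠ "IDLE" ∧ t.2.2 ≤ n ∧ t.2.1 ∉ b then b ++ [t.2.1] else b

def ktbStepB (d : PySem.Dict String Int) (t : Int × String × Int) : PySem.Dict String Int :=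
  if t.2.1 ≠ "IDLE" then
    match d.get? t.2.1 with
    | none => d.insert t.2.1 t.2.2
    | some eski => if t.2.2 < eski then d.insert t.2.1 t.2.2 else d
  else d

def ktbInv (n : Int) (b : List String) (d : PySem.Dict String Int) : Prop :=
  d.keys.Nodup ∧
  (∀ p, p ∈ b ↔ ∃ v, d.get? p = some v ∧ v ≤ n) ∧
  b.length = d.keys.countP (fun p => decide (d.getD p 0 ≤ n))

-- invariant preservation when the dict entry at p is inserted/overwritten with value `bit`
lemma ktb_step_insert (n : Int) (b : List String) (d : PySem.Dict String Int)
    (p : String) (bit : Int) (hnd : d.keys.Nodup)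
    (hmem : ∀ q, q ∈ b ↔ ∃ v, d.get? q = some v ∧ v ≤ n)
    (hlen : b.length = d.keys.countP (fun q => decide (d.getD q 0 ≤ n)))
    (hlow : ∀ v, d.get? p = some v → bit < v) :
    ktbInv n (if bit ≤ n ∧ p ∉ b then b ++ [p] else b) (d.insert p bit) := by
  refine ⟨PySem.Dict.nodup_keys_insert d p bit hnd, ?_, ?_⟩
  · intro q
    by_cases hq : q = p
    · subst hq
      rw [PySem.Dict.get?_insert, if_pos rfl]
      by_cases hbn : bit ≤ n
      · by_cases hqb : q ∈ b
        · rw [if_neg (fun hh => hh.2 hqb)]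
          exact ⟨fun _ => ⟨bit, rfl, hbn⟩, fun _ => hqb⟩
        · rw [if_pos ⟨hbn, hqb⟩]
          simp [hbn]
      · rw [if_neg (fun hh => hbn hh.1)]
        constructor
        · intro hqb
          obtain ⟨v, hv, hvn⟩ := (hmem q).1 hqb
          have := hlow v hv
          exact absurd (show bit ≤ n by omega) hbn
        · rintro ⟨v, hv, hvn⟩
          cases hv
          exact absurd hvn hbn
    · have hget : (d.insert p bit).get? q = d.get? q := by
        rw [PySem.Dict.get?_insert, if_neg hq]
      rw [hget]
      by_cases hcond : bit ≤ n ∧ p ∉ b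
      · rw [if_pos hcond]; simp [List.mem_append, hq, hmem q]
      · rw [if_neg hcond]; exact hmem q
  · cases hg : d.get? p with
    | none =>
      have hpk : p ∉ d.keys := (PySem.Dict.get?_eq_none_iff_not_mem_keys d p).mp hg
      have hpb : p ∉ b := fun hpb => by
        obtain ⟨v, hv, _⟩ := (hmem p).1 hpb; rw [hg] at hv; cases hv
      have hc : d.contains p = false := by
        rw [PySem.Dict.contains_eq_isSome_get?, hg]; rfl
      rw [PySem.Dict.keys_insert_of_not_contains d bit hc, List.countP_append, List.countP_cons]
      have hcnt : d.keys.countP (fun x => decide ((d.insert p bit).getD x 0 ≤ n))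
          = d.keys.countP (fun x => decide (d.getD x 0 ≤ n)) :=
        List.countP_congr (fun x hx => by
          rw [PySem.Dict.getD_insert, if_neg (show ¬ x = p from fun he => hpk (he ▸ hx))])
      rw [List.countP_nil, hcnt]
      have hdp : (d.insert p bit).getD p 0 = bit := by
        rw [PySem.Dict.getD_insert, if_pos rfl]
      by_cases hbn : bit ≤ n
      · rw [if_pos ⟨hbn, hpb⟩]; simp [hdp, hbn, hlen]
      · rw [if_neg (fun hh => hbn hh.1)]; simp [hdp, hbn, hlen]
    | some v =>
      have hbv : bit < v := hlow v hg
      have hpk : p ∈ d.keys := by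
        by_contra hnk
        rw [(PySem.Dict.get?_eq_none_iff_not_mem_keys d p).mpr hnk] at hg; cases hg
      have hc : d.contains p = true := (PySem.Dict.contains_iff_mem_keys d p).mpr hpk
      have hdv : d.getD p 0 = v := PySem.Dict.getD_of_get?_eq_some d 0 hg
      have hdp : (d.insert p bit).getD p 0 = bit := by
        rw [PySem.Dict.getD_insert, if_pos rfl]
      have hpbv : p ∈ b ↔ v ≤ n := by
        rw [hmem p]
        constructor
        · rintro ⟨w, hw, hwn⟩; rw [hg] at hw; cases hw; exact hwn
        · intro hvn; exact ⟨v, hg, hvn⟩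
      rw [PySem.Dict.keys_insert_of_contains d bit hc]
      have hflip := ktb_countP_flip d.keys hnd p hpk
        (fun x => decide (d.getD x 0 ≤ n))
        (fun x => decide ((d.insert p bit).getD x 0 ≤ n))
        (fun x _ hx => by simp only [PySem.Dict.getD_insert, if_neg hx])
      beta_reduce at hflip
      rw [hdv, hdp] at hflip
      simp only [decide_eq_true_eq] at hflip
      by_cases hvn : v ≤ n
      · have hpb : p ∈ b := hpbv.mpr hvn
        rw [if_neg (fun hh => hh.2 hpb)]
        have hbn : bit ≤ n := by omega
        rw [if_pos hvn, if_pos hbn] at hflip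
        omega
      · have hpb : p ∉ b := fun hh => hvn (hpbv.mp hh)
        rw [if_neg hvn] at hflip
        by_cases hbn : bit ≤ n
        · rw [if_pos hbn] at hflip
          rw [if_pos ⟨hbn, hpb⟩]
          simp only [List.length_append, List.length_singleton]
          omega
        · rw [if_neg hbn] at hflip
          rw [if_neg (fun hh => hbn hh.1)]
          omega

lemma ktb_step (n : Int) (b : List String) (d : PySem.Dict String Int)
    (t : Int × String × Int) (h : ktbInv n b d) : ktbInv n (ktbStepA n b t) (ktbStepB d t) := by
  obtain ⟨hnd, hmem, hlen⟩ := h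
  obtain ⟨z, p, bit⟩ := t
  unfold ktbStepA ktbStepB
  dsimp only
  by_cases hp : p = "IDLE"
  · simp only [hp, ne_eq, not_true_eq_false, false_and, if_false]
    exact ⟨hnd, hmem, hlen⟩
  · rw [if_pos hp]
    have hA : (if p ≠ "IDLE" ∧ bit ≤ n ∧ p ∉ b then b ++ [p] else b)
        = (if bit ≤ n ∧ p ∉ b then b ++ [p] else b) := by
      by_cases hc : bit ≤ n ∧ p ∉ b
      · rw [if_pos ⟨hp, hc.1, hc.2⟩, if_pos hc]
      · rw [if_neg (fun hh => hc ⟨hh.2.1, hh.2.2⟩), if_neg hc]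
    rw [hA]
    cases hg : d.get? p with
    | none =>
      exact ktb_step_insert n b d p bit hnd hmem hlen (fun v hv => by rw [hg] at hv; cases hv)
    | some v =>
      dsimp only
      by_cases hbv : bit < v
      · rw [if_pos hbv]
        exact ktb_step_insert n b d p bit hnd hmem hlen (fun w hw => by
          rw [hg] at hw; cases hw; exact hbv)
      · rw [if_neg hbv]
        -- dict unchanged; A appends nothing: if bit ≤ n then v ≤ bit ≤ n so p ∈ b
        have hnoapp : ¬ (bit ≤ n ∧ p ∉ b) := by
          rintro ⟨hbn, hpb⟩
          exact hpb ((hmem p).2 ⟨v, hg, by omega⟩)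
        rw [if_neg hnoapp]
        exact ⟨hnd, hmem, hlen⟩

lemma ktb_fold (n : Int) (zs : List (Int × String × Int)) (b : List String)
    (d : PySem.Dict String Int) (h : ktbInv n b d) :
    ktbInv n (zs.foldl (ktbStepA n) b) (zs.foldl ktbStepB d) := by
  induction zs generalizing b d with
  | nil => exact h
  | cons t zs ih => exact ih _ _ (ktb_step n b d t h)

lemma ktb_init (n : Int) : ktbInv n [] PySem.Dict.empty := by
  refine ⟨?_, ?_, ?_⟩ <;> simp [PySem.Dict.get?_empty, PySem.Dict.keys_empty]

-- for each threshold n, A's dedup-list length equals B's count of minima ≤ n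
lemma ktb_count (n : Int) (zs : List (Int × String × Int)) :
    ((zs.foldl (ktbStepA n) []).length : Int)
      = (((zs.foldl ktbStepB PySem.Dict.empty).values.filter (fun m => decide (m ≤ n))).length : Int) := by
  obtain ⟨hnd, -, hlen⟩ := ktb_fold n zs [] PySem.Dict.empty (ktb_init n)
  rw [PySem.Dict.values_eq_map_keys _ hnd 0, ← List.countP_eq_length_filter, List.countP_map]
  exact_mod_cast hlen

-- ===== VERDICT (by name: the statement is the Claim_ definition above) =====
theorem kac_tane_bitti_spec : Claim_equal_kac_tane_bitti := by
  intro zamanlar noktalar _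
  unfold Spec_kac_tane_bitti kac_tane_bitti kac_tane_bitti_alt
  show (noktalar.foldl (fun (cikti : PySem.Dict Int Int) n =>
      cikti.insert n (((zamanlar.foldl (ktbStepA n) []).length : Int))) PySem.Dict.empty).items
    = (noktalar.foldl (fun (cikti : PySem.Dict Int Int) n =>
      cikti.insert n ((((zamanlar.foldl ktbStepB PySem.Dict.empty).values.filter
        (fun m => decide (m ≤ n))).length : Int))) PySem.Dict.empty).items
  have hf : (fun (cikti : PySem.Dict Int Int) n =>
        cikti.insert n (((zamanlar.foldl (ktbStepA n) []).length : Int)))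
      = (fun (cikti : PySem.Dict Int Int) n =>
        cikti.insert n ((((zamanlar.foldl ktbStepB PySem.Dict.empty).values.filter
          (fun m => decide (m ≤ n))).length : Int))) := by
    funext c n
    rw [ktb_count n zamanlar]
  rw [hf]
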